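-- pv_equiv track=rewrite | github.com/nuomifan666/lanqiaobei | 斐波那契数列.py | count_fibonacci_with_last_digit_seven
-- ===== SOURCE A (Python) =====
-- def count_fibonacci_with_last_digit_seven(n):
--     if n < 1:
--         return 0
--
--     # 初始化前两个斐波那契数
--     f1, f2 = 1, 1
--     count = 0
--
--     # 统计个位数为7的斐波那契数
--     for _ in range(1, n + 1):
--         if f1 % 10 == 7:
--             count += 1
--         f1, f2 = f2, (f1 + f2) % 10  # 只保留个位数
--
--     return count
-- ===== SOURCE B (Python) =====
-- def count_fibonacci_with_last_digit_seven(n):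
--     if n < 1:
--         return 0
--     # last digits of Fib repeat with the Pisano period 60; tabulate one period
--     digits = [1, 1]
--     for _ in range(58):
--         digits.append((digits[-1] + digits[-2]) % 10)
--     per_cycle = sum(1 for d in digits if d == 7)
--     q, r = divmod(n, 60)
--     return q * per_cycle + sum(1 for d in digits[:r] if d == 7)
-- ===== Notes on version B (the rewrite author's own statement) =====
-- stated objective: faster
-- what changed: Replaces the per-element loop over all n Fibonacci last digits by the Pisano period of the last digits: a fixed one-period table, then count = full cycles times the per-cycle count plus the count in the remainder prefix.
import Mathlib
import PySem

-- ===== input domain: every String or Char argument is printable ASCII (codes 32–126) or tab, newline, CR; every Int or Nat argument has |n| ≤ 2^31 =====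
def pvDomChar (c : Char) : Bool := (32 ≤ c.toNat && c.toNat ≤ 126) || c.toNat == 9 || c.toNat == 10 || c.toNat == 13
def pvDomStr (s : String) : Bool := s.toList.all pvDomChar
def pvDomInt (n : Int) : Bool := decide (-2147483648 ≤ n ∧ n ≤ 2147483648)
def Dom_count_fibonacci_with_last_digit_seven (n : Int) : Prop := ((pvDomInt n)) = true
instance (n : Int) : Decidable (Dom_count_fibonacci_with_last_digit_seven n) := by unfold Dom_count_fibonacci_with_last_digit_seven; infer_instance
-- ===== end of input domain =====

-- B replaces A's O(n) loop by a fixed Pisano-period table of Fibonacci last digits: full-cycle count times cycles plus a prefix count.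

-- ===== PORT A =====
-- literal port of A: loop over range(1, n+1) carrying (f1, f2, count)
def count_fibonacci_with_last_digit_seven (n : Int) : Int :=
  if n < 1 then 0
  else
    ((PySem.List.pyRange 1 (n + 1) 1).foldl
      (fun (st : Int × Int × Int) _ =>
        let count := if PySem.Int.mod st.1 10 = 7 then st.2.2 + 1 else st.2.2
        (st.2.1, PySem.Int.mod (st.1 + st.2.1) 10, count)) (1, 1, 0)).2.2

-- ===== PORT B =====
-- digits[-1] / digits[-2]: the list always has ≥ 2 elements, so pyGet? is never none; .getD 0 is unreachable
def pvSeven (c : Int) (d : Int) : Int := if d = 7 then c + 1 else c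

def count_fibonacci_with_last_digit_seven_alt (n : Int) : Int :=
  if n < 1 then 0
  else
    let digits := (PySem.List.pyRange 0 58 1).foldl
      (fun ds _ => ds ++ [PySem.Int.mod ((PySem.List.pyGet? ds (-1)).getD 0 + (PySem.List.pyGet? ds (-2)).getD 0) 10])
      [1, 1]
    let perCycle := digits.foldl pvSeven 0
    let q := PySem.Int.floordiv n 60
    let r := PySem.Int.mod n 60
    q * perCycle + (PySem.List.slice digits none (some r)).foldl pvSeven 0

-- ===== PRECONDITION & SPEC =====
def Spec_count_fibonacci_with_last_digit_seven (n : Int) (out : Int) : Prop := out = count_fibonacci_with_last_digit_seven_alt n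
instance (n : Int) (out : Int) : Decidable (Spec_count_fibonacci_with_last_digit_seven n out) := by unfold Spec_count_fibonacci_with_last_digit_seven; infer_instance

-- ===== CLAIM (what is proved, stated in full; the proofs are below) =====
def Claim_equal_count_fibonacci_with_last_digit_seven : Prop := ∀ (n : Int), Dom_count_fibonacci_with_last_digit_seven n → Spec_count_fibonacci_with_last_digit_seven n (count_fibonacci_with_last_digit_seven n)

-- ===== LEMMAS AND PROOFS =====

-- A's loop step on the (f1, f2) pair
def pvStep (p : Int × Int) : Int × Int := (p.2, PySem.Int.mod (p.1 + p.2) 10)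

-- number of 7-hits in the next k iterations of A's loop started from pair p
def pvCountFrom (p : Int × Int) : Nat → Int
  | 0 => 0
  | k + 1 => (if PySem.Int.mod p.1 10 = 7 then 1 else 0) + pvCountFrom (pvStep p) k

lemma pvFoldA (L : List Int) : ∀ (f1 f2 c : Int),
    (L.foldl
      (fun (st : Int × Int × Int) _ =>
        let count := if PySem.Int.mod st.1 10 = 7 then st.2.2 + 1 else st.2.2
        (st.2.1, PySem.Int.mod (st.1 + st.2.1) 10, count)) (f1, f2, c)).2.2
      = c + pvCountFrom (f1, f2) L.length := by
  induction L with
  | nil => intro f1 f2 c; simp [pvCountFrom]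
  | cons x xs ih =>
    intro f1 f2 c
    simp only [List.foldl_cons, List.length_cons, pvCountFrom]
    rw [ih]
    simp [pvStep]
    split <;> ring

lemma pvCountFrom_add (a : Nat) : ∀ (p : Int × Int) (b : Nat),
    pvCountFrom p (a + b) = pvCountFrom p a + pvCountFrom (pvStep^[a] p) b := by
  induction a with
  | zero => intro p b; simp [pvCountFrom]
  | succ a ih =>
    intro p b
    have h : a + 1 + b = (a + b) + 1 := by omega
    rw [h]
    simp only [pvCountFrom]
    rw [ih (pvStep p) b, Function.iterate_succ_apply]
    ring

lemma pvPeriod : pvStep^[60] ((1 : Int), (1 : Int)) = (1, 1) := by decide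

lemma pvCycleCount : pvCountFrom ((1 : Int), (1 : Int)) 60 = 8 := by decide

lemma pvCountQR (q : Nat) : ∀ (r : Nat),
    pvCountFrom ((1 : Int), (1 : Int)) (60 * q + r) = q * 8 + pvCountFrom (1, 1) r := by
  induction q with
  | zero => intro r; simp
  | succ q ih =>
    intro r
    have h : 60 * (q + 1) + r = 60 + (60 * q + r) := by omega
    rw [h, pvCountFrom_add 60, pvPeriod, pvCycleCount, ih r]
    push_cast; ring

-- the concrete 60-entry table built by B
def pvDigits : List Int :=
  (PySem.List.pyRange 0 58 1).foldl
    (fun ds _ => ds ++ [PySem.Int.mod ((PySem.List.pyGet? ds (-1)).getD 0 + (PySem.List.pyGet? ds (-2)).getD 0) 10])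
    [1, 1]

set_option maxRecDepth 8000 in
lemma pvPerCycle : pvDigits.foldl pvSeven 0 = 8 := by decide

set_option maxRecDepth 8000 in
lemma pvSliceCount : ∀ k : Nat, k < 60 →
    (PySem.List.slice pvDigits none (some (k : Int))).foldl pvSeven 0
      = pvCountFrom ((1 : Int), (1 : Int)) k := by decide

lemma pvRangeLen (n : Int) : (PySem.List.pyRange 1 (n + 1) 1).length = n.toNat := by
  rw [PySem.List.length_pyRange_one]
  omega

-- B's value, with the inline digits table named pvDigits (definitionally the same term)
lemma pvAltEq (n : Int) (hn : ¬ n < 1) :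
    count_fibonacci_with_last_digit_seven_alt n
      = PySem.Int.floordiv n 60 * (pvDigits.foldl pvSeven 0)
        + (PySem.List.slice pvDigits none (some (PySem.Int.mod n 60))).foldl pvSeven 0 := by
  unfold count_fibonacci_with_last_digit_seven_alt pvDigits
  simp only [hn, if_false]

-- ===== VERDICT (by name: the statement is the Claim_ definition above) =====
theorem count_fibonacci_with_last_digit_seven_spec : Claim_equal_count_fibonacci_with_last_digit_seven := by
  intro n _
  show _ = _
  by_cases hn : n < 1
  · unfold count_fibonacci_with_last_digit_seven count_fibonacci_with_last_digit_seven_alt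
    simp [hn]
  · rw [pvAltEq n hn, pvPerCycle]
    unfold count_fibonacci_with_last_digit_seven
    simp only [hn, if_false]
    rw [pvFoldA _ 1 1 0, pvRangeLen n]
    rw [PySem.Int.floordiv_eq_ediv_of_pos (by omega), PySem.Int.mod_eq_emod_of_pos (by omega)]
    have hq : 0 ≤ n / 60 := Int.ediv_nonneg (by omega) (by omega)
    have hr0 : 0 ≤ n % 60 := Int.emod_nonneg n (by omega)
    have hr1 : n % 60 < 60 := Int.emod_lt_of_pos n (by omega)
    have hdm : 60 * (n / 60) + n % 60 = n := Int.mul_ediv_add_emod n 60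
    have hnat : n.toNat = 60 * (n / 60).toNat + (n % 60).toNat := by omega
    rw [hnat, pvCountQR]
    have hk := pvSliceCount (n % 60).toNat (by omega)
    have hcast : ((n % 60).toNat : Int) = n % 60 := by omega
    rw [hcast] at hk
    rw [hk]
    have : ((n / 60).toNat : Int) = n / 60 := by omega
    omega
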